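-- pv_equiv track=rewrite | github.com/cksghkd123/algorithm | 07.03/1697_숨바꼭질_백준_수정.py | HNS
-- ===== SOURCE A (Python) =====
-- import collections
--
-- def case(N):
--     plus1 = N+1
--     minus1 = N-1
--     double = 2*N
--
--     return plus1,minus1,double
--
-- def HNS(N,K):
--     deq = collections.deque()
--     onetime = collections.deque()
--     deq.append(N)
--     count = 0
--
--     while deq:
--         count += 1
--
--         while deq:
--             onetime.append(deq.popleft())
--
--         while onetime:
--             N = onetime.popleft()
--             n1, n2, n3 = case(N)
--             if n1 == K or n2 == K or n3 == K:
--                 return count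
--
--             deq.extend([n1,n2,n3])
-- ===== SOURCE B (Python) =====
-- def HNS(N, K):
--     visited = {N}
--     frontier = [N]
--     count = 0
--     while True:
--         count += 1
--         nxt = []
--         for n in frontier:
--             for m in (n + 1, n - 1, 2 * n):
--                 if m == K:
--                     return count
--                 if m not in visited:
--                     visited.add(m)
--                     nxt.append(m)
--         frontier = nxt
-- ===== Notes on version B (the rewrite author's own statement) =====
-- stated objective: alternative
-- what changed: Replaces A's visited-less level-by-level expansion (the frontier triples every level) by a standard BFS that keeps a visited set and only enqueues values not seen before, while keeping A's quirk of never checking N == K directly (the answer is always >= 1).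
import Mathlib
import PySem

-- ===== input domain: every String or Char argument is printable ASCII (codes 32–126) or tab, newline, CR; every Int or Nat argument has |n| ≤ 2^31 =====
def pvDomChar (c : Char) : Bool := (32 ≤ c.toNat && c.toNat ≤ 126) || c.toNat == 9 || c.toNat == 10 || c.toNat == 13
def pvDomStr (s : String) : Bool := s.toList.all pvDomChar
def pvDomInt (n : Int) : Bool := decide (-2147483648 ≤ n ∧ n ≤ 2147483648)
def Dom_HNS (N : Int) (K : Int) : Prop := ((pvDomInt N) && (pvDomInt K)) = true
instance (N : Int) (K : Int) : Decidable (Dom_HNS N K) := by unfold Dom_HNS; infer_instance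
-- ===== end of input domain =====

-- B replaces A's visited-less level-by-level expansion by a standard BFS with a visited
-- set (only unseen values are enqueued), keeping A's behaviour of never checking N == K
-- at depth 0 (the answer is always ≥ 1).
-- Both while-loops are totalized with the same fuel ((K-N).natAbs + 2 levels), which the
-- Python executions never exhaust (a pure ±1 path reaches K within that many levels).

-- ===== PORT A =====
def pyCase (N : Int) : Int × Int × Int := (N + 1, N - 1, 2 * N)

-- the inner two while-loops of A: drain deq into onetime, then process each node
def HNS_level (K : Int) : List Int → List Int → Option (List Int)
  | [], deq => some deq
  | n :: rest, deq =>
    let (n1, n2, n3) := pyCase n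
    if n1 = K ∨ n2 = K ∨ n3 = K then none      -- none = "return count"
    else HNS_level K rest (deq ++ [n1, n2, n3])

-- the outer while-loop of A (fuel only totalizes; Python never exhausts it)
def HNS_go (K : Int) (deq : List Int) (count : Int) : Nat → Int
  | 0 => 0
  | fuel + 1 =>
    match HNS_level K deq [] with
    | none => count + 1
    | some next => HNS_go K next (count + 1) fuel

def HNS (N : Int) (K : Int) : Int := HNS_go K [N] 0 ((K - N).natAbs + 2)

-- ===== PORT B =====
-- the inner "for m in (n+1, n-1, 2*n)" loop of B
def HNS_alt_scan (K : Int) : List Int → PySem.Set Int → List Int → Option (PySem.Set Int × List Int)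
  | [], vis, nxt => some (vis, nxt)
  | m :: ms, vis, nxt =>
    if m = K then none                          -- none = "return count"
    else if PySem.Set.contains vis m then HNS_alt_scan K ms vis nxt
    else HNS_alt_scan K ms (PySem.Set.add vis m) (nxt ++ [m])

-- the "for n in frontier" loop of B
def HNS_alt_level (K : Int) : List Int → PySem.Set Int → List Int → Option (PySem.Set Int × List Int)
  | [], vis, nxt => some (vis, nxt)
  | n :: rest, vis, nxt =>
    match HNS_alt_scan K [n + 1, n - 1, 2 * n] vis nxt with
    | none => none
    | some (vis', nxt') => HNS_alt_level K rest vis' nxt'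

-- the outer while-loop of B (same fuel totalization as A's port)
def HNS_alt_go (K : Int) (frontier : List Int) (vis : PySem.Set Int) (count : Int) : Nat → Int
  | 0 => 0
  | fuel + 1 =>
    match HNS_alt_level K frontier vis [] with
    | none => count + 1
    | some (vis', nxt) => HNS_alt_go K nxt vis' (count + 1) fuel

def HNS_alt (N : Int) (K : Int) : Int :=
  HNS_alt_go K [N] (PySem.Set.ofList [N]) 0 ((K - N).natAbs + 2)

-- ===== PRECONDITION & SPEC =====
def Spec_HNS (N : Int) (K : Int) (out : Int) : Prop := out = HNS_alt N K
instance (N : Int) (K : Int) (out : Int) : Decidable (Spec_HNS N K out) := by unfold Spec_HNS; infer_instance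

-- ===== CLAIM (what is proved, stated in full; the proofs are below) =====
def Claim_equal_HNS : Prop := ∀ (N : Int) (K : Int), Dom_HNS N K → Spec_HNS N K (HNS N K)

-- ===== LEMMAS AND PROOFS =====

-- one BFS edge
def child (n m : Int) : Prop := n + 1 = m ∨ n - 1 = m ∨ 2 * n = m

-- values reachable from N in exactly d steps
def Rch (N : Int) : Nat → Int → Prop
  | 0, x => x = N
  | d + 1, x => ∃ p, Rch N d p ∧ child p x

lemma mem_children_iff_child (n x : Int) : x ∈ [n + 1, n - 1, 2 * n] ↔ child n x := by
  simp only [List.mem_cons, List.not_mem_nil, or_false, child]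
  constructor
  · rintro (rfl | rfl | rfl); exacts [Or.inl rfl, Or.inr (Or.inl rfl), Or.inr (Or.inr rfl)]
  · rintro (h | h | h); exacts [Or.inl h.symm, Or.inr (Or.inl h.symm), Or.inr (Or.inr h.symm)]

lemma level_none_iff (K : Int) (l : List Int) : ∀ acc : List Int,
    HNS_level K l acc = none ↔ ∃ n ∈ l, child n K := by
  induction l with
  | nil => intro acc; simp [HNS_level]
  | cons n rest ih =>
    intro acc
    simp only [HNS_level, pyCase]
    by_cases h : n + 1 = K ∨ n - 1 = K ∨ 2 * n = K
    · rw [if_pos h]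
      constructor
      · intro _; exact ⟨n, List.mem_cons_self, h⟩
      · intro _; rfl
    · rw [if_neg h, ih]
      constructor
      · rintro ⟨m, hm, hc⟩; exact ⟨m, List.mem_cons_of_mem _ hm, hc⟩
      · rintro ⟨m, hm, hc⟩
        rcases List.mem_cons.mp hm with rfl | hm'
        · exact absurd hc h
        · exact ⟨m, hm', hc⟩

lemma level_some (K : Int) (l : List Int) : ∀ (acc out : List Int),
    HNS_level K l acc = some out →
    ∀ x, x ∈ out ↔ x ∈ acc ∨ ∃ n ∈ l, child n x := by
  induction l with
  | nil => intro acc out h x; simp [HNS_level] at h; simp [← h]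
  | cons n rest ih =>
    intro acc out h x
    simp only [HNS_level, pyCase] at h
    by_cases hc : n + 1 = K ∨ n - 1 = K ∨ 2 * n = K
    · rw [if_pos hc] at h; cases h
    · rw [if_neg hc] at h
      rw [ih _ _ h x, List.mem_append, mem_children_iff_child]
      constructor
      · rintro ((ha | hb) | ⟨m, hm, hcm⟩)
        · exact Or.inl ha
        · exact Or.inr ⟨n, List.mem_cons_self, hb⟩
        · exact Or.inr ⟨m, List.mem_cons_of_mem _ hm, hcm⟩
      · rintro (ha | ⟨m, hm, hcm⟩)
        · exact Or.inl (Or.inl ha)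
        · rcases List.mem_cons.mp hm with rfl | hm'
          · exact Or.inl (Or.inr hcm)
          · exact Or.inr ⟨m, hm', hcm⟩

lemma scan_none_iff (K : Int) (ms : List Int) : ∀ (vis : PySem.Set Int) (nxt : List Int),
    HNS_alt_scan K ms vis nxt = none ↔ K ∈ ms := by
  induction ms with
  | nil => intro vis nxt; simp [HNS_alt_scan]
  | cons m ms ih =>
    intro vis nxt
    simp only [HNS_alt_scan]
    by_cases h : m = K
    · simp [h]
    · rw [if_neg h]
      split <;> rw [ih] <;> simp [List.mem_cons, Ne.symm h]

lemma scan_some (K : Int) (ms : List Int) : ∀ (vis : PySem.Set Int) (nxt : List Int)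
    (vis' : PySem.Set Int) (nxt' : List Int),
    HNS_alt_scan K ms vis nxt = some (vis', nxt') →
    (∀ x, x ∈ vis' ↔ x ∈ vis ∨ x ∈ ms) ∧
    (∀ x, x ∈ nxt' ↔ x ∈ nxt ∨ (x ∈ ms ∧ x ∉ vis)) := by
  induction ms with
  | nil =>
    intro vis nxt vis' nxt' h
    simp only [HNS_alt_scan, Option.some.injEq, Prod.mk.injEq] at h
    obtain ⟨h1, h2⟩ := h
    subst h1; subst h2
    simp
  | cons m ms ih =>
    intro vis nxt vis' nxt' h
    simp only [HNS_alt_scan] at h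
    by_cases hK : m = K
    · rw [if_pos hK] at h; cases h
    · rw [if_neg hK] at h
      by_cases hv : PySem.Set.contains vis m = true
      · rw [if_pos hv] at h
        obtain ⟨h1, h2⟩ := ih _ _ _ _ h
        have hmv : m ∈ vis := (PySem.Set.contains_iff _ _).mp hv
        refine ⟨fun x => ?_, fun x => ?_⟩
        · rw [h1 x]; simp only [List.mem_cons]
          by_cases hxm : x = m <;> simp [hxm, hmv]
        · rw [h2 x]; simp only [List.mem_cons]
          by_cases hxm : x = m <;> simp [hxm, hmv]
      · rw [if_neg hv] at h
        obtain ⟨h1, h2⟩ := ih _ _ _ _ h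
        have hmv : m ∉ vis := fun hm => hv ((PySem.Set.contains_iff _ _).mpr hm)
        refine ⟨fun x => ?_, fun x => ?_⟩
        · rw [h1 x]; simp only [PySem.Set.mem_add, List.mem_cons]
          by_cases hxm : x = m <;> simp [hxm, hmv]
        · rw [h2 x]
          simp only [PySem.Set.mem_add, List.mem_append, List.mem_cons, List.not_mem_nil, or_false]
          by_cases hxm : x = m <;> simp [hxm, hmv]

lemma alt_level_none_iff (K : Int) (l : List Int) : ∀ (vis : PySem.Set Int) (nxt : List Int),
    HNS_alt_level K l vis nxt = none ↔ ∃ n ∈ l, child n K := by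
  induction l with
  | nil => intro vis nxt; simp [HNS_alt_level]
  | cons n rest ih =>
    intro vis nxt
    rw [HNS_alt_level]
    cases hs : HNS_alt_scan K [n + 1, n - 1, 2 * n] vis nxt with
    | none =>
      constructor
      · intro _
        exact ⟨n, List.mem_cons_self,
          (mem_children_iff_child n K).mp ((scan_none_iff K _ vis nxt).mp hs)⟩
      · intro _; rfl
    | some p =>
      obtain ⟨vis1, nxt1⟩ := p
      have hnc : ¬ child n K := by
        intro hc
        have h0 := (scan_none_iff K [n + 1, n - 1, 2 * n] vis nxt).mpr
          ((mem_children_iff_child n K).mpr hc)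
        rw [hs] at h0
        cases h0
      show HNS_alt_level K rest vis1 nxt1 = none ↔ _
      rw [ih]
      constructor
      · rintro ⟨m, hm, hc⟩; exact ⟨m, List.mem_cons_of_mem _ hm, hc⟩
      · rintro ⟨m, hm, hc⟩
        rcases List.mem_cons.mp hm with rfl | hm'
        · exact absurd hc hnc
        · exact ⟨m, hm', hc⟩

lemma alt_level_some (K : Int) (l : List Int) : ∀ (vis : PySem.Set Int) (nxt : List Int)
    (vis' : PySem.Set Int) (nxt' : List Int),
    HNS_alt_level K l vis nxt = some (vis', nxt') →
    (∀ x, x ∈ vis' ↔ x ∈ vis ∨ ∃ n ∈ l, child n x) ∧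
    (∀ x, x ∈ nxt' ↔ x ∈ nxt ∨ ((∃ n ∈ l, child n x) ∧ x ∉ vis)) := by
  induction l with
  | nil =>
    intro vis nxt vis' nxt' h
    simp only [HNS_alt_level, Option.some.injEq, Prod.mk.injEq] at h
    obtain ⟨h1, h2⟩ := h
    subst h1; subst h2
    simp
  | cons n rest ih =>
    intro vis nxt vis' nxt' h
    rw [HNS_alt_level] at h
    cases hs : HNS_alt_scan K [n + 1, n - 1, 2 * n] vis nxt with
    | none => rw [hs] at h; cases h
    | some p =>
      obtain ⟨vis1, nxt1⟩ := p
      rw [hs] at h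
      have h' : HNS_alt_level K rest vis1 nxt1 = some (vis', nxt') := h
      obtain ⟨s1, s2⟩ := scan_some K _ vis nxt vis1 nxt1 hs
      obtain ⟨l1, l2⟩ := ih vis1 nxt1 vis' nxt' h'
      have hch : ∀ x, x ∈ vis1 ↔ x ∈ vis ∨ child n x := by
        intro x; rw [s1 x, mem_children_iff_child]
      have hch2 : ∀ x, x ∈ nxt1 ↔ x ∈ nxt ∨ (child n x ∧ x ∉ vis) := by
        intro x; rw [s2 x, mem_children_iff_child]
      constructor
      · intro x
        rw [l1 x, hch x]
        constructor
        · rintro ((h | h) | ⟨m, hm, hc⟩)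
          · exact Or.inl h
          · exact Or.inr ⟨n, List.mem_cons_self, h⟩
          · exact Or.inr ⟨m, List.mem_cons_of_mem _ hm, hc⟩
        · rintro (h | ⟨m, hm, hc⟩)
          · exact Or.inl (Or.inl h)
          · rcases List.mem_cons.mp hm with rfl | hm'
            · exact Or.inl (Or.inr hc)
            · exact Or.inr ⟨m, hm', hc⟩
      · intro x
        rw [l2 x, hch2 x, hch x]
        constructor
        · rintro ((h | ⟨hc, hn⟩) | ⟨⟨m, hm, hc⟩, hn⟩)
          · exact Or.inl h
          · exact Or.inr ⟨⟨n, List.mem_cons_self, hc⟩, hn⟩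
          · exact Or.inr ⟨⟨m, List.mem_cons_of_mem _ hm, hc⟩, fun hx => hn (Or.inl hx)⟩
        · rintro (h | ⟨⟨m, hm, hc⟩, hn⟩)
          · exact Or.inl (Or.inl h)
          · rcases List.mem_cons.mp hm with rfl | hm'
            · exact Or.inl (Or.inr ⟨hc, hn⟩)
            · by_cases hnx : child n x
              · exact Or.inl (Or.inr ⟨hnx, hn⟩)
              · exact Or.inr ⟨⟨m, hm', hc⟩, fun hx => by rcases hx with hx | hx; exacts [hn hx, hnx hx]⟩

lemma go_eq (N K : Int) (fuel : Nat) :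
    ∀ (c : Nat) (fA fB : List Int) (vis : PySem.Set Int) (cnt : Int),
    (∀ x, x ∈ fA ↔ Rch N c x) →
    (∀ x, x ∈ fB ↔ (Rch N c x ∧ ∀ j, j < c → ¬ Rch N j x)) →
    (∀ x, x ∈ vis ↔ ∃ j, j ≤ c ∧ Rch N j x) →
    (∀ i, 1 ≤ i → i ≤ c → ¬ Rch N i K) →
    HNS_go K fA cnt fuel = HNS_alt_go K fB vis cnt fuel := by
  induction fuel with
  | zero => intros; rfl
  | succ f ih =>
    intro c fA fB vis cnt hA hB hV hNo
    have hitBA : (∃ n ∈ fB, child n K) → (∃ n ∈ fA, child n K) := by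
      rintro ⟨n, hn, hc⟩
      exact ⟨n, (hA n).mpr ((hB n).mp hn).1, hc⟩
    have hitAB : (∃ n ∈ fA, child n K) → (∃ n ∈ fB, child n K) := by
      rintro ⟨n, hn, hc⟩
      have hRn : Rch N c n := (hA n).mp hn
      by_cases hj : ∃ j, j < c ∧ Rch N j n
      · obtain ⟨j, hjc, hRj⟩ := hj
        exact absurd (show Rch N (j + 1) K from ⟨n, hRj, hc⟩)
          (hNo (j + 1) (Nat.le_add_left 1 j) (Nat.succ_le_of_lt hjc))
      · exact ⟨n, (hB n).mpr ⟨hRn, fun j hjc hRj => hj ⟨j, hjc, hRj⟩⟩, hc⟩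
    simp only [HNS_go, HNS_alt_go]
    cases hla : HNS_level K fA [] with
    | none =>
      have hhit := (level_none_iff K fA []).mp hla
      have hlb : HNS_alt_level K fB vis [] = none :=
        (alt_level_none_iff K fB vis []).mpr (hitAB hhit)
      rw [hlb]
    | some next =>
      have hnA : ¬ ∃ n ∈ fA, child n K := by
        intro h
        have h0 := (level_none_iff K fA []).mpr h
        rw [hla] at h0
        cases h0
      have hnB : ¬ ∃ n ∈ fB, child n K := fun h => hnA (hitBA h)
      cases hlb : HNS_alt_level K fB vis [] with
      | none => exact absurd ((alt_level_none_iff K fB vis []).mp hlb) hnB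
      | some p =>
        obtain ⟨vis', nxt⟩ := p
        obtain ⟨b1, b2⟩ := alt_level_some K fB vis [] vis' nxt hlb
        have hAset := level_some K fA [] next hla
        have hParent : ∀ x, Rch N (c + 1) x → x ∉ vis → ∃ n ∈ fB, child n x := by
          rintro x ⟨p, hp, hc⟩ hnv
          by_cases hj : ∃ j, j < c ∧ Rch N j p
          · obtain ⟨j, hjc, hRj⟩ := hj
            exact absurd ((hV x).mpr ⟨j + 1, Nat.succ_le_of_lt hjc, ⟨p, hRj, hc⟩⟩) hnv
          · exact ⟨p, (hB p).mpr ⟨hp, fun j hjc hRj => hj ⟨j, hjc, hRj⟩⟩, hc⟩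
        show HNS_go K next (cnt + 1) f = HNS_alt_go K nxt vis' (cnt + 1) f
        refine ih (c + 1) next nxt vis' (cnt + 1) ?_ ?_ ?_ ?_
        · intro x
          rw [hAset x]
          simp only [List.not_mem_nil, false_or]
          constructor
          · rintro ⟨n, hn, hc⟩; exact ⟨n, (hA n).mp hn, hc⟩
          · rintro ⟨p, hp, hc⟩; exact ⟨p, (hA p).mpr hp, hc⟩
        · intro x
          rw [b2 x]
          simp only [List.not_mem_nil, false_or]
          constructor
          · rintro ⟨⟨n, hn, hc⟩, hnv⟩
            refine ⟨⟨n, ((hB n).mp hn).1, hc⟩, ?_⟩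
            intro j hjc hRj
            exact hnv ((hV x).mpr ⟨j, Nat.lt_succ_iff.mp hjc, hRj⟩)
          · rintro ⟨hR, hall⟩
            have hnv : x ∉ vis := fun hx => by
              obtain ⟨j, hjc, hRj⟩ := (hV x).mp hx
              exact hall j (Nat.lt_succ_of_le hjc) hRj
            exact ⟨hParent x hR hnv, hnv⟩
        · intro x
          rw [b1 x]
          constructor
          · rintro (hx | ⟨n, hn, hc⟩)
            · obtain ⟨j, hjc, hRj⟩ := (hV x).mp hx
              exact ⟨j, Nat.le_succ_of_le hjc, hRj⟩
            · exact ⟨c + 1, le_refl _, ⟨n, ((hB n).mp hn).1, hc⟩⟩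
          · rintro ⟨j, hjc, hRj⟩
            rcases Nat.lt_succ_iff_lt_or_eq.mp (Nat.lt_succ_of_le hjc) with hj | rfl
            · exact Or.inl ((hV x).mpr ⟨j, Nat.lt_succ_iff.mp hj, hRj⟩)
            · by_cases hx : x ∈ vis
              · exact Or.inl hx
              · exact Or.inr (hParent x hRj hx)
        · intro i h1 hi
          rcases Nat.lt_succ_iff_lt_or_eq.mp (Nat.lt_succ_of_le hi) with hj | rfl
          · exact hNo i h1 (Nat.lt_succ_iff.mp hj)
          · rintro ⟨p, hp, hc⟩
            exact hnA ⟨p, (hA p).mpr hp, hc⟩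

-- ===== VERDICT (by name: the statement is the Claim_ definition above) =====
theorem HNS_spec : Claim_equal_HNS := by
  intro N K _
  unfold Spec_HNS HNS HNS_alt
  apply go_eq N K _ 0
  · intro x; simp [Rch]
  · intro x; simp [Rch]
  · intro x
    constructor
    · intro h
      refine ⟨0, le_refl _, ?_⟩
      have : x = N := by simpa [PySem.Set.ofList, PySem.Set.add, PySem.Set.empty] using h
      simpa [Rch] using this
    · rintro ⟨j, hj, hR⟩
      obtain rfl := Nat.le_zero.mp hj
      simp only [Rch] at hR
      simp [hR, PySem.Set.ofList, PySem.Set.add, PySem.Set.empty]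
  · intro i h1 h2; omega
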